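-- pv_equiv track=rewrite | github.com/jpalazz24/comp110-21s-workspace | exercises/ex03/palindromify.py | palindromify
-- ===== SOURCE A (Python) =====
-- def palindromify(word: str, length: bool) -> str:
--     """Function to make a word a palindrome."""
--     i: int = 0
--     palindrome: str = ""
--     last_letter: int = 1
--     while i < len(word):
--         if length:
--             palindrome += word[len(word) - last_letter]
--         else:
--             while i < (len(word) - 1):
--                 palindrome += word[len(word) - (last_letter + 1)]
--                 last_letter += 1
--                 i += 1
--         last_letter += 1
--         i += 1
--     return word + palindrome
-- ===== SOURCE B (Python) =====
-- def palindromify(word: str, length: bool) -> str: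
--     """Function to make a word a palindrome."""
--     if length:
--         return word + word[::-1]
--     return word + word[:-1][::-1]
-- ===== Notes on version B (the rewrite author's own statement) =====
-- stated objective: simpler
-- what changed: Replaced the nested while loops with index bookkeeping by a closed-form slice expression: word + word[::-1] when length is True, else word + word[:-1][::-1].
import Mathlib
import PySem

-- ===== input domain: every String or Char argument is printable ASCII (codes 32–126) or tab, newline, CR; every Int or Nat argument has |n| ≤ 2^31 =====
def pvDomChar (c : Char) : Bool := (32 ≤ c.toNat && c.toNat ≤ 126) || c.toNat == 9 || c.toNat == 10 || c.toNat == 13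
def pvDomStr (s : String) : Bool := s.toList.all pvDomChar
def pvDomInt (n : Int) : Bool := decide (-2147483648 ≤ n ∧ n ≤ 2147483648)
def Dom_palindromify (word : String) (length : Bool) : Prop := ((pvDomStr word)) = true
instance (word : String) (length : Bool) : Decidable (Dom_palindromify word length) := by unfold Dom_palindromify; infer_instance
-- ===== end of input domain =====

-- B replaces A's nested while loops by closed-form slicing (word + word[::-1] / word + word[:-1][::-1]); objective: simpler.

-- ===== PORT A =====
-- inner 'while i < (len(word) - 1)' loop of A; returns (palindrome, last_letter, i).
-- The Nat argument is fuel making the recursion structural (w.length iterations always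
-- suffice, proved by the lemmas below); word[...] is ported as pyGetD with a dummy
-- default: the index is always in range where the loop body runs, so Python never raises.
def pvAInner : Nat → List Char → Int → Int → List Char → List Char × Int × Int
  | 0, _, i, last, pal => (pal, last, i)
  | fuel + 1, w, i, last, pal =>
    if i < (w.length : Int) - 1 then
      pvAInner fuel w (i + 1) (last + 1) (pal ++ [PySem.List.pyGetD w ((w.length : Int) - (last + 1)) ' '])
    else (pal, last, i)

-- outer 'while i < len(word)' loop of A (same fuel device; len(word)+1 iterations suffice)
def pvAOuter : Nat → List Char → Int → Int → List Char → Bool → List Char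
  | 0, _, _, _, pal, _ => pal
  | fuel + 1, w, i, last, pal, length =>
    if i < (w.length : Int) then
      if length then
        pvAOuter fuel w (i + 1) (last + 1) (pal ++ [PySem.List.pyGetD w ((w.length : Int) - last) ' ']) length
      else
        let r := pvAInner w.length w i last pal
        pvAOuter fuel w (r.2.2 + 1) (r.2.1 + 1) r.1 length
    else pal

def palindromify (word : String) (length : Bool) : String :=
  String.ofList (word.toList ++ pvAOuter (word.toList.length + 1) word.toList 0 1 [] length)

-- ===== PORT B =====
def palindromify_alt (word : String) (length : Bool) : String :=
  let w := word.toList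
  if length then
    String.ofList (w ++ (PySem.List.slice? w none none (-1)).getD [])
  else
    String.ofList (w ++ (PySem.List.slice? (PySem.List.slice w none (some (-1))) none none (-1)).getD [])

-- ===== PRECONDITION & SPEC =====
def Spec_palindromify (word : String) (length : Bool) (out : String) : Prop := out = palindromify_alt word length
instance (word : String) (length : Bool) (out : String) : Decidable (Spec_palindromify word length out) := by unfold Spec_palindromify; infer_instance

-- ===== CLAIM (what is proved, stated in full; the proofs are below) =====
def Claim_equal_palindromify : Prop := ∀ (word : String) (length : Bool), Dom_palindromify word length → Spec_palindromify word length (palindromify word length)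

-- ===== LEMMAS AND PROOFS =====

theorem pvAInner_spec (w : List Char) (n : Nat) :
    ∀ (fuel : Nat) (pal : List Char), n ≤ fuel → n + 1 ≤ w.length →
    pvAInner fuel w ((w.length : Int) - 1 - n) ((w.length : Int) - n) pal
      = (pal ++ (w.take n).reverse, (w.length : Int), (w.length : Int) - 1) := by
  induction n with
  | zero =>
      intro fuel pal _ hn
      cases fuel with
      | zero => simp [pvAInner]
      | succ f => rw [pvAInner, if_neg (by omega)]; simp
  | succ n ih =>
      intro fuel pal hf hn
      cases fuel with
      | zero => omega
      | succ f =>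
        rw [pvAInner, if_pos (by push_cast; omega)]
        have hc : ((n + 1 : Nat) : Int) = (n : Int) + 1 := by push_cast; ring
        rw [hc]
        have hget : PySem.List.pyGetD w ((w.length : Int) - ((w.length : Int) - ((n : Int) + 1) + 1)) ' '
            = w[n]'(by omega) := by
          rw [show ((w.length : Int) - ((w.length : Int) - ((n : Int) + 1) + 1)) = (n : Int) by ring]
          rw [PySem.List.pyGetD_natCast]
          exact List.getD_eq_getElem _ _ (by omega)
        have h1 : (w.length : Int) - 1 - ((n : Int) + 1) + 1 = (w.length : Int) - 1 - n := by ring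
        have h2 : (w.length : Int) - ((n : Int) + 1) + 1 = (w.length : Int) - n := by ring
        rw [hget, h1, h2, ih f _ (by omega) (by omega)]
        have ht : w.take (n + 1) = w.take n ++ [w[n]'(by omega)] := by
          rw [List.take_add_one, List.getElem?_eq_getElem (by omega)]; rfl
        rw [ht, List.reverse_append, List.reverse_singleton, List.singleton_append, List.append_assoc]; rfl

theorem pvAOuter_true_spec (w : List Char) (n : Nat) :
    ∀ (fuel : Nat) (pal : List Char), n ≤ fuel → n ≤ w.length →
    pvAOuter fuel w ((w.length : Int) - n) ((w.length : Int) - n + 1) pal true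
      = pal ++ (w.take n).reverse := by
  induction n with
  | zero =>
      intro fuel pal _ _
      cases fuel with
      | zero => simp [pvAOuter]
      | succ f => rw [pvAOuter, if_neg (by omega)]; simp
  | succ n ih =>
      intro fuel pal hf hn
      cases fuel with
      | zero => omega
      | succ f =>
        rw [pvAOuter, if_pos (by push_cast; omega), if_pos rfl]
        have hc : ((n + 1 : Nat) : Int) = (n : Int) + 1 := by push_cast; ring
        rw [hc]
        have hget : PySem.List.pyGetD w ((w.length : Int) - ((w.length : Int) - ((n : Int) + 1) + 1)) ' '
            = w[n]'(by omega) := by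
          rw [show ((w.length : Int) - ((w.length : Int) - ((n : Int) + 1) + 1)) = (n : Int) by ring]
          rw [PySem.List.pyGetD_natCast]
          exact List.getD_eq_getElem _ _ (by omega)
        have h1 : (w.length : Int) - ((n : Int) + 1) + 1 = (w.length : Int) - n := by ring
        rw [hget, h1, ih f _ (by omega) (by omega)]
        have ht : w.take (n + 1) = w.take n ++ [w[n]'(by omega)] := by
          rw [List.take_add_one, List.getElem?_eq_getElem (by omega)]; rfl
        rw [ht, List.reverse_append, List.reverse_singleton, List.singleton_append, List.append_assoc]; rfl

theorem pvAOuter_done (w : List Char) (fuel : Nat) (i last : Int) (pal : List Char) (length : Bool)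
    (h : (w.length : Int) ≤ i) : pvAOuter fuel w i last pal length = pal := by
  cases fuel with
  | zero => rfl
  | succ f => rw [pvAOuter, if_neg (by omega)]

theorem pvAOuter_true (w : List Char) : pvAOuter (w.length + 1) w 0 1 [] true = w.reverse := by
  have := pvAOuter_true_spec w w.length (w.length + 1) [] (by omega) le_rfl
  simpa using this

theorem pvAOuter_false (w : List Char) : pvAOuter (w.length + 1) w 0 1 [] false = w.dropLast.reverse := by
  rcases w.eq_nil_or_concat with rfl | ⟨ys, y, rfl⟩
  · rw [pvAOuter, if_neg (by simp)]; rfl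
  · rw [List.concat_eq_append]
    have hlen : (ys ++ [y]).length = ys.length + 1 := by simp
    rw [pvAOuter, if_pos (by simp)]
    simp only [Bool.false_eq_true, if_false]
    have hinner := pvAInner_spec (ys ++ [y]) ys.length (ys ++ [y]).length [] (by omega) (by simp)
    have h0 : ((ys ++ [y]).length : Int) - 1 - (ys.length : Int) = 0 := by
      rw [hlen]; push_cast; ring
    have h1 : ((ys ++ [y]).length : Int) - (ys.length : Int) = 1 := by
      rw [hlen]; push_cast; ring
    rw [h0, h1] at hinner
    have hp : (pvAInner (ys ++ [y]).length (ys ++ [y]) 0 1 []).1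
        = (List.take ys.length (ys ++ [y])).reverse := by rw [hinner]; simp
    have hi : (pvAInner (ys ++ [y]).length (ys ++ [y]) 0 1 []).2.2
        = ((ys ++ [y]).length : Int) - 1 := by rw [hinner]
    rw [hp, hi, pvAOuter_done _ _ _ _ _ _ (by omega)]
    simp

-- ===== VERDICT (by name: the statement is the Claim_ definition above) =====
theorem palindromify_spec : Claim_equal_palindromify := by
  intro word length _
  unfold Spec_palindromify palindromify palindromify_alt
  cases length with
  | true =>
      rw [pvAOuter_true]
      simp [PySem.List.slice?_none_none_neg_one]
  | false =>
      rw [pvAOuter_false]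
      simp [PySem.List.slice?_none_none_neg_one, PySem.List.slice_to_neg_one]
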